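-- pv_equiv track=rewrite | github.com/dsalzedon/random_exercises | primer_dup.py | check_duplicate
-- ===== SOURCE A (Python) =====
-- from typing import List
--
-- def check_duplicate(lst: List) -> dict:
--     """
--     Crea un diccionario de duplicados
--     Crea una copia de la lista para comparar los elementos
--     Checa si el elemento se encuentra en la copia
--     si está, agrega el elemento y su indice, al dict
--     """
--     my_dups = {}
--
--     for x in range(len(lst)):
--         nw_lst = lst[:]
--         nw_lst.pop(x)  # elimina el elemento de ese indice de la nueva lista
--         for y in range(len(nw_lst)):
--             # la comparacion va primero en el AND para evitar q haga la segunda condicion en caso de q no sean iguales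
--             # uso un AND para evitar poner dos if, y así evitar q aumente la complejidad (mcabee)
--             if lst[x] == nw_lst[y] and lst[x] not in my_dups:
--                 # agrega el elemento y el indice al dict
--                 my_dups[lst[x]] = y + 1
--
--     return my_dups
-- ===== SOURCE B (Python) =====
-- def check_duplicate(lst):
--     positions = {}
--     for i, v in enumerate(lst):
--         positions.setdefault(v, []).append(i)
--     return {v: p[1] for v, p in positions.items() if len(p) > 1}
-- ===== Notes on version B (the rewrite author's own statement) =====
-- stated objective: faster
-- what changed: Replaces the copy-pop-and-rescan nested loops with a single pass that groups all indices per value in a dict, then selects the second index of each value occurring at least twice.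
import Mathlib
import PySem

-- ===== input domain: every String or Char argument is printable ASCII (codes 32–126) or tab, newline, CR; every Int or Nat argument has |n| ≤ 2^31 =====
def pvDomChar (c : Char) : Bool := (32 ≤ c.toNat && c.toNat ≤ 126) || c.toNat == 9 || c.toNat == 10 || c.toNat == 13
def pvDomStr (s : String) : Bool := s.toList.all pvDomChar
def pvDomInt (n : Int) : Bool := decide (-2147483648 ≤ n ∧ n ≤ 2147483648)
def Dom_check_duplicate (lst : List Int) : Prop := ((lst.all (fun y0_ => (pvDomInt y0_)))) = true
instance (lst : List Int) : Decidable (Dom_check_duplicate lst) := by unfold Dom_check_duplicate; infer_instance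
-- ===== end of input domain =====

-- B replaces A's copy-pop-and-rescan nested loops by one grouping pass over enumerate(lst)
-- plus a selection pass over the groups; return value only (neither version mutates its argument).


-- ===== PORT A =====
-- literal port of A: for x in range(len(lst)): copy lst[:], pop(x), scan y in range(len(nw_lst))
def check_duplicate (lst : List Int) : List (Int × Int) :=
  let my_dups : PySem.Dict Int Int :=
    (PySem.List.pyRange 0 (lst.length : Int) 1).foldl (fun d x =>
      let nw_lst := PySem.List.slice lst none none
      match PySem.List.pop? nw_lst x with
      | none => d  -- unreachable: x is always in range
      | some (_, nw_lst) =>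
        (PySem.List.pyRange 0 (nw_lst.length : Int) 1).foldl (fun d y =>
          if PySem.List.pyGetD lst x 0 == PySem.List.pyGetD nw_lst y 0
              && !(d.contains (PySem.List.pyGetD lst x 0)) then
            d.insert (PySem.List.pyGetD lst x 0) (y + 1)
          else d) d) PySem.Dict.empty
  my_dups.items

-- ===== PORT B =====
-- literal port of B: group all indices per value in one pass, then keep the second index
-- of every value with at least two occurrences
def check_duplicate_alt (lst : List Int) : List (Int × Int) :=
  let positions : PySem.Dict Int (List Int) :=
    (PySem.List.enumerate lst 0).foldl (fun d p => d.modify p.2 [] (fun l => l ++ [p.1]))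
      PySem.Dict.empty
  positions.items.filterMap (fun p =>
    if 1 < p.2.length then some (p.1, (PySem.List.pyGet? p.2 1).getD 0) else none)

-- ===== PRECONDITION & SPEC =====
def Spec_check_duplicate (lst : List Int) (out : List (Int × Int)) : Prop := out = check_duplicate_alt lst
instance (lst : List Int) (out : List (Int × Int)) : Decidable (Spec_check_duplicate lst out) := by unfold Spec_check_duplicate; infer_instance

-- ===== CLAIM (what is proved, stated in full; the proofs are below) =====
def Claim_equal_check_duplicate : Prop := ∀ (lst : List Int), Dom_check_duplicate lst → Spec_check_duplicate lst (check_duplicate lst)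

-- ===== LEMMAS AND PROOFS =====

-- the indices at which v occurs in lst, in order
def occIdx (lst : List Int) (v : Int) : List Int :=
  ((PySem.List.enumerate lst 0).filter (fun p => p.2 == v)).map (fun p => p.1)

-- the common result shape: values of the first k positions that occur at least twice in lst,
-- in first-occurrence order, each paired with the index of its second occurrence
def specItems (lst : List Int) (k : Nat) : List (Int × Int) :=
  (PySem.List.dedup (lst.take k)).filterMap (fun v =>
    if 1 < (occIdx lst v).length then some (v, (PySem.List.pyGet? (occIdx lst v) 1).getD 0) else none)

lemma occIdx_length_eq_count (lst : List Int) (v : Int) :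
    (occIdx lst v).length = lst.count v := by
  rw [occIdx, List.length_map, ← List.countP_eq_length_filter]
  conv_rhs => rw [← PySem.List.map_snd_enumerate lst 0]
  rw [List.count, List.countP_map]
  rfl

lemma fst_specItems (lst : List Int) (k : Nat) :
    (specItems lst k).map Prod.fst
      = (PySem.List.dedup (lst.take k)).filter (fun v => decide (1 < (occIdx lst v).length)) := by
  rw [specItems]
  generalize PySem.List.dedup (lst.take k) = l
  induction l with
  | nil => rfl
  | cons a l ih =>
    rw [List.filterMap_cons, List.filter_cons]
    by_cases h : 1 < (occIdx lst a).length
    · simp only [h, if_pos, decide_true, List.map_cons, ih]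
    · simp only [h, if_neg, not_false_iff, decide_false, ih]
      simp

lemma contains_specItems (lst : List Int) (k : Nat) (v : Int) :
    (PySem.Dict.mk (specItems lst k)).contains v
      = decide (v ∈ lst.take k ∧ 1 < (occIdx lst v).length) := by
  rw [PySem.Dict.contains_eq_decide_mem_keys]
  have hkeys : (PySem.Dict.mk (specItems lst k)).keys = (specItems lst k).map Prod.fst := rfl
  rw [hkeys, fst_specItems]
  simp [List.mem_filter, PySem.List.dedup_eq_ofList, PySem.Set.mem_ofList]

lemma list_decomp (lst : List Int) (k : Nat) (hk : k < lst.length) :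
    lst = lst.take k ++ lst[k] :: lst.drop (k+1) := by
  conv_lhs => rw [← List.take_append_drop k lst, List.drop_eq_getElem_cons hk]

lemma count_decomp (lst : List Int) (k : Nat) (v : Int) (hk : k < lst.length)
    (hvk : lst[k] = v) :
    lst.count v = (lst.take k).count v + (lst.drop (k+1)).count v + 1 := by
  conv_lhs => rw [list_decomp lst k hk]
  rw [hvk, List.count_append, List.count_cons_self]
  ring

lemma filter_enumerate_nil (s : List Int) (v : Int) (start : Int) (hv : v ∉ s) :
    (PySem.List.enumerate s start).filter (fun p => p.2 == v) = [] := by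
  rw [List.filter_eq_nil_iff]
  intro p hp
  rw [PySem.List.mem_enumerate_iff] at hp
  obtain ⟨i, hi, rfl⟩ := hp
  simp only [Bool.not_eq_true, beq_eq_false_iff_ne, ne_eq]
  intro he
  exact hv (by rw [← he]; exact List.getElem_mem _)

lemma occIdx_decomp (lst : List Int) (k : Nat) (v : Int) (hk : k < lst.length)
    (hvk : lst[k] = v) (hv : v ∉ lst.take k) :
    occIdx lst v = (k : Int)
      :: ((PySem.List.enumerate (lst.drop (k+1)) ((k : Int)+1)).filter (fun p => p.2 == v)).map (fun p => p.1) := by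
  rw [occIdx]
  conv_lhs => rw [list_decomp lst k hk]
  rw [PySem.List.enumerate_append, hvk, PySem.List.enumerate_cons, List.filter_append,
    filter_enumerate_nil _ _ _ hv, List.filter_cons]
  have hlen : (lst.take k).length = k := List.length_take_of_le hk.le
  simp [hlen]

lemma filter_enum_head (s : List Int) (v : Int) (start : Int) (j : Nat)
    (hj : PySem.List.index? s v = some j) :
    ∃ rest, ((PySem.List.enumerate s start).filter (fun p => p.2 == v)).map (fun p => p.1)
      = (start + (j : Int)) :: rest := by
  rw [PySem.List.index?_eq_some_iff] at hj
  obtain ⟨pre, suf, rfl, hlen, hpre⟩ := hj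
  rw [PySem.List.enumerate_append, PySem.List.enumerate_cons, List.filter_append,
    filter_enumerate_nil _ _ _ hpre, List.filter_cons]
  simp [hlen]

lemma take_succ_getElem (lst : List Int) (k : Nat) (h : k < lst.length) :
    lst.take (k+1) = lst.take k ++ [lst[k]] := by
  rw [List.take_add_one, List.getElem?_eq_getElem h]
  rfl

lemma dedup_append_singleton (l : List Int) (v : Int) :
    PySem.List.dedup (l ++ [v]) = if v ∈ l then PySem.List.dedup l else PySem.List.dedup l ++ [v] := by
  simp only [PySem.List.dedup_eq_ofList, PySem.Set.ofList_eq_foldl, List.foldl_append,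
    List.foldl_cons, List.foldl_nil]
  rw [PySem.Set.add]
  simp [PySem.Set.contains, ← PySem.Set.ofList_eq_foldl]

-- A's inner scan is a no-op once the sought key is already in the dict
lemma inner_of_contains (ys : List Int) (nw : List Int) (v : Int)
    (d : PySem.Dict Int Int) (h : d.contains v = true) :
    ys.foldl (fun d y =>
      if v == PySem.List.pyGetD nw y 0 && !(d.contains v) then d.insert v (y + 1) else d) d = d := by
  induction ys with
  | nil => rfl
  | cons y ys ih => simpa [h] using ih

-- A's inner scan is a no-op over indices whose element is not v
lemma inner_no_match (ys : List Int) (nw : List Int) (v : Int)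
    (d : PySem.Dict Int Int) (h : ∀ y ∈ ys, 0 ≤ y ∧ y < (nw.length : Int) ∧ v ≠ nw[y.toNat]!) :
    ys.foldl (fun d y =>
      if v == PySem.List.pyGetD nw y 0 && !(d.contains v) then d.insert v (y + 1) else d) d = d := by
  rw [PySem.List.foldl_congr_mem (g := fun d _ => d), PySem.List.foldl_ignore]
  intro acc y hy
  obtain ⟨h0, h1, hne⟩ := h y hy
  rw [PySem.List.pyGetD_eq_getElem nw 0 h0 h1]
  have : v ≠ nw[y.toNat] := by
    simpa [List.getElem!_eq_getElem?_getD,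
      List.getElem?_eq_getElem (by omega : y.toNat < nw.length)] using hne
  simp [this]

lemma inner_of_not_mem (nw : List Int) (v : Int)
    (d : PySem.Dict Int Int) (h : v ∉ nw) :
    (PySem.List.pyRange 0 (nw.length : Int) 1).foldl (fun d y =>
      if v == PySem.List.pyGetD nw y 0 && !(d.contains v) then d.insert v (y + 1) else d) d = d := by
  apply inner_no_match
  intro y hy
  rw [PySem.List.mem_pyRange_one] at hy
  refine ⟨hy.1, hy.2, ?_⟩
  have hlt : y.toNat < nw.length := by omega
  intro he
  refine h ?_
  rw [List.getElem!_eq_getElem?_getD, List.getElem?_eq_getElem hlt] at he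
  rw [he]
  exact List.getElem_mem _

-- with the key absent, A's inner scan inserts exactly the first matching position (+1)
lemma inner_first_match (nw : List Int) (v : Int) (j : Nat)
    (d : PySem.Dict Int Int) (hc : d.contains v = false)
    (hj : PySem.List.index? nw v = some j) :
    (PySem.List.pyRange 0 (nw.length : Int) 1).foldl (fun d y =>
      if v == PySem.List.pyGetD nw y 0 && !(d.contains v) then d.insert v (y + 1) else d) d
      = d.insert v ((j : Int) + 1) := by
  obtain ⟨hk, hvj, hlt⟩ := PySem.List.getElem_of_index?_eq_some hj
  have hjn : (j : Int) < (nw.length : Int) := by exact_mod_cast hk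
  have hsplit : PySem.List.pyRange 0 (nw.length : Int) 1
      = PySem.List.pyRange 0 (j : Int) 1
        ++ ((j : Int) :: PySem.List.pyRange ((j : Int) + 1) (nw.length : Int) 1) := by
    rw [← PySem.List.pyRange_one_cons hjn]
    exact PySem.List.pyRange_one_append 0 (j : Int) _ (by positivity) hjn.le
  rw [hsplit, List.foldl_append, List.foldl_cons]
  rw [inner_no_match _ nw v d ?pre]
  case pre =>
    intro y hy
    rw [PySem.List.mem_pyRange_one] at hy
    refine ⟨hy.1, lt_trans hy.2 hjn, ?_⟩
    have hylt : y.toNat < j := by omega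
    have := hlt y.toNat hylt
    rw [List.getElem!_eq_getElem?_getD, List.getElem?_eq_getElem (by omega : y.toNat < nw.length)]
    exact fun he => this he.symm
  have hb : (if v == PySem.List.pyGetD nw (j : Int) 0 && !(d.contains v)
      then d.insert v ((j : Int) + 1) else d) = d.insert v ((j : Int) + 1) := by
    rw [PySem.List.pyGetD_eq_getElem nw 0 (by positivity) hjn]
    simp [hvj, hc]
  rw [hb]
  exact inner_of_contains _ nw v _ (PySem.Dict.contains_insert_self d v _)

lemma index?_append_of_not_mem {l : List Int} (t : List Int) {v : Int} (h : v ∉ l) :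
    PySem.List.index? (l ++ t) v = (PySem.List.index? t v).map (· + l.length) := by
  induction l with
  | nil => simp [Option.map_id']
  | cons a l ih =>
    simp only [List.mem_cons, not_or] at h
    rw [List.cons_append, PySem.List.index?_cons_of_ne _ (Ne.symm h.1), ih h.2]
    cases PySem.List.index? t v
    · simp
    · simp; omega

-- one iteration of A's outer loop takes specItems k to specItems (k+1)
lemma outer_step (lst : List Int) (k : Nat) (hk : k < lst.length) :
    (fun (d : PySem.Dict Int Int) (x : Int) =>
      let nw_lst := PySem.List.slice lst none none
      match PySem.List.pop? nw_lst x with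
      | none => d
      | some (_, nw_lst) =>
        (PySem.List.pyRange 0 (nw_lst.length : Int) 1).foldl (fun d y =>
          if PySem.List.pyGetD lst x 0 == PySem.List.pyGetD nw_lst y 0
              && !(d.contains (PySem.List.pyGetD lst x 0)) then
            d.insert (PySem.List.pyGetD lst x 0) (y + 1)
          else d) d) (PySem.Dict.mk (specItems lst k)) (k : Int)
    = PySem.Dict.mk (specItems lst (k+1)) := by
  have hg : PySem.List.pyGetD lst (k : Int) 0 = lst[k] := by
    rw [PySem.List.pyGetD_eq_getElem lst 0 (by positivity) (by exact_mod_cast hk)]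
    simp
  simp only [PySem.List.slice_none_none, PySem.List.pop?_natCast lst k hk, hg]
  by_cases hv : lst[k] ∈ lst.take k
  · have hcnt : 1 < (occIdx lst lst[k]).length := by
      rw [occIdx_length_eq_count, count_decomp lst k _ hk rfl]
      have : 0 < (lst.take k).count lst[k] := List.count_pos_iff.mpr hv
      omega
    have hcontains : (PySem.Dict.mk (specItems lst k)).contains lst[k] = true := by
      rw [contains_specItems]
      simp [hv, hcnt]
    rw [inner_of_contains _ _ _ _ hcontains]
    have : specItems lst (k+1) = specItems lst k := by
      rw [specItems, specItems, take_succ_getElem lst k hk, dedup_append_singleton, if_pos hv]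
    rw [this]
  · have hcontains : (PySem.Dict.mk (specItems lst k)).contains lst[k] = false := by
      rw [contains_specItems]
      simp [hv]
    by_cases hw : lst[k] ∈ lst.drop (k+1)
    · obtain ⟨j', hj'⟩ : ∃ j', PySem.List.index? (lst.drop (k+1)) lst[k] = some j' := by
        have := (PySem.List.index?_isSome_iff (lst.drop (k+1)) lst[k]).mpr hw
        exact Option.isSome_iff_exists.mp this
      have hidx : PySem.List.index? (lst.eraseIdx k) lst[k] = some (j' + k) := by
        rw [List.eraseIdx_eq_take_drop_succ, index?_append_of_not_mem _ hv, hj']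
        simp [List.length_take_of_le hk.le]
      rw [inner_first_match _ _ _ _ hcontains hidx]
      apply PySem.Dict.ext
      rw [PySem.Dict.items_insert_of_not_contains _ _ hcontains]
      have hitems : (PySem.Dict.mk (specItems lst k)).items = specItems lst k := rfl
      have hitems' : (PySem.Dict.mk (specItems lst (k+1))).items = specItems lst (k+1) := rfl
      rw [hitems, hitems']
      have hcnt : 1 < (occIdx lst lst[k]).length := by
        rw [occIdx_length_eq_count, count_decomp lst k _ hk rfl]
        have : 0 < (lst.drop (k+1)).count lst[k] := List.count_pos_iff.mpr hw
        omega
      obtain ⟨rest, hrest⟩ := filter_enum_head (lst.drop (k+1)) lst[k] ((k : Int) + 1) j' hj'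
      have hocc : occIdx lst lst[k] = (k : Int) :: ((k : Int) + 1 + (j' : Int)) :: rest := by
        rw [occIdx_decomp lst k lst[k] hk rfl hv, hrest]
      have hval : (PySem.List.pyGet? (occIdx lst lst[k]) 1).getD 0 = ((j' + k : Nat) : Int) + 1 := by
        rw [hocc]
        have := PySem.List.pyGet?_natCast ((k : Int) :: ((k : Int) + 1 + (j' : Int)) :: rest) 1
        simp only [Nat.cast_one] at this
        rw [this]
        simp
        ring
      rw [specItems, specItems, take_succ_getElem lst k hk, dedup_append_singleton, if_neg hv,
        List.filterMap_append]
      simp only [List.filterMap_cons, List.filterMap_nil, if_pos hcnt, hval]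
    · have hnw : lst[k] ∉ lst.eraseIdx k := by
        rw [List.eraseIdx_eq_take_drop_succ]
        simp only [List.mem_append]
        exact fun h => h.elim hv hw
      rw [inner_of_not_mem _ _ _ hnw]
      have : specItems lst (k+1) = specItems lst k := by
        have hcnt : ¬ (1 < (occIdx lst lst[k]).length) := by
          rw [occIdx_length_eq_count, count_decomp lst k _ hk rfl]
          have h1 : (lst.take k).count lst[k] = 0 := List.count_eq_zero.mpr hv
          have h2 : (lst.drop (k+1)).count lst[k] = 0 := List.count_eq_zero.mpr hw
          omega
        rw [specItems, specItems, take_succ_getElem lst k hk, dedup_append_singleton, if_neg hv,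
          List.filterMap_append]
        simp [hcnt]
      rw [this]

lemma outer_loop_spec (lst : List Int) (k : Nat) (hk : k ≤ lst.length) :
    (PySem.List.pyRange 0 (k : Int) 1).foldl (fun d x =>
      let nw_lst := PySem.List.slice lst none none
      match PySem.List.pop? nw_lst x with
      | none => d
      | some (_, nw_lst) =>
        (PySem.List.pyRange 0 (nw_lst.length : Int) 1).foldl (fun d y =>
          if PySem.List.pyGetD lst x 0 == PySem.List.pyGetD nw_lst y 0
              && !(d.contains (PySem.List.pyGetD lst x 0)) then
            d.insert (PySem.List.pyGetD lst x 0) (y + 1)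
          else d) d) PySem.Dict.empty = PySem.Dict.mk (specItems lst k) := by
  induction k with
  | zero =>
    rw [Nat.cast_zero, PySem.List.pyRange_one_eq_nil le_rfl]
    rfl
  | succ k ih =>
    rw [Nat.cast_add, Nat.cast_one, PySem.List.pyRange_one_succ_right (by positivity),
      List.foldl_append, List.foldl_cons, List.foldl_nil, ih (by omega)]
    exact outer_step lst k (by omega)

lemma check_duplicate_eq_spec (lst : List Int) :
    check_duplicate lst = specItems lst lst.length := by
  show ((PySem.List.pyRange 0 (lst.length : Int) 1).foldl (fun d x =>
      let nw_lst := PySem.List.slice lst none none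
      match PySem.List.pop? nw_lst x with
      | none => d
      | some (_, nw_lst) =>
        (PySem.List.pyRange 0 (nw_lst.length : Int) 1).foldl (fun d y =>
          if PySem.List.pyGetD lst x 0 == PySem.List.pyGetD nw_lst y 0
              && !(d.contains (PySem.List.pyGetD lst x 0)) then
            d.insert (PySem.List.pyGetD lst x 0) (y + 1)
          else d) d) (PySem.Dict.empty : PySem.Dict Int Int)).items = _
  rw [outer_loop_spec lst lst.length le_rfl]

lemma positions_eq (lst : List Int) :
    (PySem.List.enumerate lst 0).foldl (fun d p => d.modify p.2 [] (fun l => l ++ [p.1]))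
      (PySem.Dict.empty : PySem.Dict Int (List Int))
    = ((PySem.List.enumerate lst 0).map Prod.swap).foldl
        (fun d p => d.modify p.1 [] (fun l => l ++ [p.2])) PySem.Dict.empty := by
  rw [List.foldl_map]
  rfl

lemma keys_positions (lst : List Int) :
    ((PySem.List.enumerate lst 0).foldl (fun d p => d.modify p.2 [] (fun l => l ++ [p.1]))
      (PySem.Dict.empty : PySem.Dict Int (List Int))).keys = PySem.List.dedup lst := by
  rw [positions_eq]
  rw [PySem.Dict.keys_foldl_modify_key _ Prod.fst [] (fun _ p => (fun l => l ++ [p.2]))]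
  have : ((PySem.List.enumerate lst 0).map Prod.swap).map Prod.fst = lst := by
    rw [List.map_map]
    exact PySem.List.map_snd_enumerate lst 0
  rw [this, PySem.List.dedup_eq_ofList, PySem.Set.ofList_eq_foldl]
  rfl

lemma nodup_keys_positions (lst : List Int) :
    ((PySem.List.enumerate lst 0).foldl (fun d p => d.modify p.2 [] (fun l => l ++ [p.1]))
      (PySem.Dict.empty : PySem.Dict Int (List Int))).keys.Nodup := by
  rw [positions_eq]
  exact PySem.Dict.nodup_keys_foldl_modify_key _ Prod.fst [] (fun _ p => (fun l => l ++ [p.2])) _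
    PySem.Dict.nodup_keys_empty

lemma getD_positions (lst : List Int) (w : Int) :
    ((PySem.List.enumerate lst 0).foldl (fun d p => d.modify p.2 [] (fun l => l ++ [p.1]))
      (PySem.Dict.empty : PySem.Dict Int (List Int))).getD w [] = occIdx lst w := by
  rw [positions_eq, PySem.Dict.getD_foldl_modify_append, PySem.Dict.getD_empty]
  rw [List.filter_map, List.map_map, occIdx]
  rfl

lemma check_duplicate_alt_eq_spec (lst : List Int) :
    check_duplicate_alt lst = specItems lst lst.length := by
  show (((PySem.List.enumerate lst 0).foldl (fun d p => d.modify p.2 [] (fun l => l ++ [p.1]))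
      (PySem.Dict.empty : PySem.Dict Int (List Int))).items).filterMap (fun p =>
    if 1 < p.2.length then some (p.1, (PySem.List.pyGet? p.2 1).getD 0) else none) = _
  rw [PySem.Dict.items_eq_map_keys _ (nodup_keys_positions lst) []]
  rw [List.filterMap_map, keys_positions]
  unfold specItems
  rw [List.take_length]
  refine List.filterMap_congr ?_
  intro v hv
  simp only [Function.comp_apply, getD_positions]

-- ===== VERDICT (by name: the statement is the Claim_ definition above) =====
theorem check_duplicate_spec : Claim_equal_check_duplicate := by
  intro lst _
  unfold Spec_check_duplicate
  rw [check_duplicate_eq_spec, check_duplicate_alt_eq_spec]
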